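-- pv_equiv track=rewrite | github.com/Wulfic/Cicada3301 | tools/transposition_analysis.py | columnar_transpose_read
-- ===== SOURCE A (Python) =====
-- import math
--
-- def columnar_transpose_read(text, cols):
--     """Read text in columnar fashion"""
--     rows = math.ceil(len(text) / cols)
--     padded = text + ' ' * (rows * cols - len(text))
--
--     # Read column by column
--     result = []
--     for col in range(cols):
--         for row in range(rows):
--             idx = row * cols + col
--             if idx < len(text):
--                 result.append(text[idx])
--     return ''.join(result)
-- ===== SOURCE B (Python) =====
-- def columnar_transpose_read(text, cols):
--     """Read text in columnar fashion"""
--     buckets = {}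
--     for i, ch in enumerate(text):
--         buckets.setdefault(i % cols, []).append(ch)
--     return ''.join(''.join(buckets.get(col, [])) for col in range(cols))
-- ===== Notes on version B (the rewrite author's own statement) =====
-- stated objective: alternative
-- what changed: Replaces the nested column-by-column gather (rows x cols index arithmetic over a conceptual padded grid) with a single forward pass that distributes each character into a per-column bucket keyed by i % cols, then concatenates the buckets in column order.
import Mathlib
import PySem

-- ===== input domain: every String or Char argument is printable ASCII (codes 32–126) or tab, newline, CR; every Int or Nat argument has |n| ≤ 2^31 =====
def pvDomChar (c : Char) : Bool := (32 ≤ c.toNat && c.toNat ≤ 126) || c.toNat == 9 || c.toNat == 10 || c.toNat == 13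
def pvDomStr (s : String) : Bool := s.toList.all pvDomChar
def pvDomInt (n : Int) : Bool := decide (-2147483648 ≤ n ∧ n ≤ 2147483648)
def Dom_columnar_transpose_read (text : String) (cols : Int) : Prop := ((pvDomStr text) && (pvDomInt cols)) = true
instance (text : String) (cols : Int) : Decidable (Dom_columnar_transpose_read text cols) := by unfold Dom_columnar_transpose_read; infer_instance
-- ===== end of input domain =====

-- B replaces A's nested column-by-column gather with a single forward pass distributing
-- characters into per-column buckets keyed by i % cols (alternative decomposition, same cost).


-- ===== PORT A =====
def columnar_transpose_read (text : String) (cols : Int) : String :=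
  let s := text.toList
  let n : Int := PySem.Str.len text
  -- rows = math.ceil(len(text) / cols): exact ceiling -((-n) // cols); cols = 0 (ZeroDivisionError) excluded by Pre_
  let rows : Int := -(PySem.Int.floordiv (-n) cols)
  -- padded = text + ' ' * (rows * cols - len(text)) — computed by A but never read afterwards
  let _padded : List Char := s ++ List.replicate (rows * cols - n).toNat ' '
  let result : List Char :=
    (PySem.List.pyRange 0 cols 1).foldl (fun acc col =>
      (PySem.List.pyRange 0 rows 1).foldl (fun acc row =>
        -- idx = row * cols + col; the guard makes it in range, so pyGetD's ' ' default is never used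
        if row * cols + col < n then acc ++ [PySem.List.pyGetD s (row * cols + col) ' '] else acc) acc) []
  String.ofList result  -- ''.join(result)

-- ===== PORT B =====
def columnar_transpose_read_alt (text : String) (cols : Int) : String :=
  let s := text.toList
  -- for i, ch in enumerate(text): buckets.setdefault(i % cols, []).append(ch)
  -- (setdefault-then-append is exactly Dict.modify with default [])
  let buckets : PySem.Dict Int (List Char) :=
    (PySem.List.enumerate s).foldl
      (fun d p => d.modify (PySem.Int.mod p.1 cols) [] (fun b => b ++ [p.2]))
      PySem.Dict.empty
  -- ''.join(''.join(buckets.get(col, [])) for col in range(cols))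
  String.ofList (((PySem.List.pyRange 0 cols 1).map (fun col => buckets.getD col [])).flatten)

-- ===== PRECONDITION & SPEC =====
-- A raises ZeroDivisionError for cols == 0 (math.ceil(len(text)/cols)); nothing else raises.
def Pre_columnar_transpose_read (text : String) (cols : Int) : Prop := cols ≠ 0
instance (text : String) (cols : Int) : Decidable (Pre_columnar_transpose_read text cols) := by unfold Pre_columnar_transpose_read; infer_instance
def pvWitness_columnar_transpose_read : String × Int := ("HELLOWORLD", 3)

def Spec_columnar_transpose_read (text : String) (cols : Int) (out : String) : Prop := out = columnar_transpose_read_alt text cols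
instance (text : String) (cols : Int) (out : String) : Decidable (Spec_columnar_transpose_read text cols out) := by unfold Spec_columnar_transpose_read; infer_instance

-- ===== CLAIM (what is proved, stated in full; the proofs are below) =====
def Claim_equal_columnar_transpose_read : Prop := ∀ (text : String) (cols : Int), Dom_columnar_transpose_read text cols → Pre_columnar_transpose_read text cols → Spec_columnar_transpose_read text cols (columnar_transpose_read text cols)
-- ===== LEMMAS AND PROOFS =====

/-- The characters of `s` sitting at absolute positions `i, i+1, …` whose position is
    ≡ `k (mod c)`, in order: the common specification of A's column and B's bucket. -/
def colChars (c k : Nat) : List Char → Nat → List Char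
  | [], _ => []
  | ch :: t, i => (if i % c = k then [ch] else []) ++ colChars c k t (i + 1)

lemma colChars_congr_mod (c k : Nat) : ∀ (s : List Char) (i j : Nat), i % c = j % c →
    colChars c k s i = colChars c k s j := by
  intro s
  induction s with
  | nil => intro i j _; rfl
  | cons ch t ih =>
      intro i j h
      simp only [colChars, h]
      rw [ih (i + 1) (j + 1) (by rw [Nat.add_mod i 1 c, Nat.add_mod j 1 c, h])]

lemma colChars_chunk (c k : Nat) (hk : k < c) : ∀ (s : List Char) (i : Nat), i ≤ c →
    colChars c k s i =
      (if i ≤ k then (s[k - i]?).toList else []) ++ colChars c k (s.drop (c - i)) 0 := by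
  intro s
  induction s with
  | nil => intro i _; simp [colChars]
  | cons ch t ih =>
      intro i hi
      rcases eq_or_lt_of_le hi with heq | hlt
      · rw [heq, colChars_congr_mod c k (ch :: t) c 0 (by simp)]
        simp [Nat.not_le.mpr hk]
      · have h1 : i % c = i := Nat.mod_eq_of_lt hlt
        have hdrop : (ch :: t).drop (c - i) = t.drop (c - (i + 1)) := by
          have h2 : c - i = (c - (i + 1)) + 1 := by omega
          rw [h2, List.drop_succ_cons]
        simp only [colChars, h1, ih (i + 1) hlt, hdrop]
        rcases lt_trichotomy i k with hik | hik | hik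
        · rw [if_neg (show ¬ i = k by omega), if_pos (show i + 1 ≤ k by omega),
            if_pos (show i ≤ k by omega),
            show k - i = (k - (i + 1)) + 1 by omega, List.getElem?_cons_succ]
          simp
        · rw [if_pos (show i = k by omega), if_neg (show ¬ i + 1 ≤ k by omega),
            if_pos (show i ≤ k by omega), show k - i = 0 by omega, List.getElem?_cons_zero]
          simp
        · rw [if_neg (show ¬ i = k by omega), if_neg (show ¬ i + 1 ≤ k by omega),
            if_neg (show ¬ i ≤ k by omega)]
          simp

lemma colChars_zero_chunk (c k : Nat) (hk : k < c) (s : List Char) :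
    colChars c k s 0 = (s[k]?).toList ++ colChars c k (s.drop c) 0 := by
  simpa using colChars_chunk c k hk s 0 (Nat.zero_le c)

/-- A's inner loop (in filter/map form over the `Nat` row range) computes `colChars`. -/
lemma aside_column (c k : Nat) (hk : k < c) : ∀ (r : Nat) (s : List Char), s.length ≤ r * c →
    ((List.range r).filter (fun row => decide (row * c + k < s.length))).map
        (fun row => s.getD (row * c + k) ' ') = colChars c k s 0 := by
  intro r
  induction r with
  | zero =>
      intro s hs
      have h0 : s = [] := List.eq_nil_of_length_eq_zero (by omega)
      rw [h0]; rfl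
  | succ r ih =>
      intro s hs
      rw [colChars_zero_chunk c k hk s]
      have htail : (List.filter (fun row => decide (row * c + k < s.length))
            (List.map Nat.succ (List.range r))).map (fun row => s.getD (row * c + k) ' ')
          = colChars c k (s.drop c) 0 := by
        rw [List.filter_map, List.map_map]
        rw [← ih (s.drop c) (by
          simp only [List.length_drop]
          have hrc : (r + 1) * c = r * c + c := by ring
          omega)]
        rw [List.filter_congr (l := List.range r)
            (q := fun row => decide (row * c + k < (s.drop c).length)) (by
          intro row _
          have hrc : (row + 1) * c = row * c + c := by ring
          simp only [Function.comp_apply, List.length_drop, decide_eq_decide,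
            Nat.succ_eq_add_one]
          omega)]
        refine List.map_congr_left ?_
        intro row hrow
        have hlt := List.of_mem_filter hrow
        simp only [decide_eq_true_eq, List.length_drop] at hlt
        have hrc : (row + 1) * c = row * c + c := by ring
        simp only [Function.comp_apply, Nat.succ_eq_add_one, List.getD_eq_getElem?_getD,
          List.getElem?_drop]
        congr 2
        omega
      rw [List.range_succ_eq_map, List.filter_cons]
      by_cases hcase : k < s.length
      · rw [if_pos (by simpa using hcase), List.map_cons, htail]
        simp [List.getD_eq_getElem?_getD, List.getElem?_eq_getElem hcase]
      · rw [if_neg (by simpa using hcase), htail]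
        simp [List.getElem?_eq_none (show s.length ≤ k by omega)]

/-- B's bucket-distribution fold: bucket `k` collects exactly `colChars`. -/
lemma bside_bucket (c k : Nat) :
    ∀ (s : List Char) (m : Nat) (d : PySem.Dict Int (List Char)),
      ((PySem.List.enumerate s (m : Int)).foldl
          (fun d p => d.modify (PySem.Int.mod p.1 (c : Int)) [] (fun b => b ++ [p.2])) d).getD
          (k : Int) []
        = d.getD (k : Int) [] ++ colChars c k s m := by
  intro s
  induction s with
  | nil => intro m d; simp [PySem.List.enumerate_nil, colChars]
  | cons ch t ih =>
      intro m d
      rw [PySem.List.enumerate_cons]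
      have hm1 : ((m : Int) + 1) = ((m + 1 : Nat) : Int) := by push_cast; ring
      simp only [List.foldl_cons, hm1, ih]
      rw [PySem.Int.mod_natCast, PySem.Dict.getD_modify]
      by_cases h : k = m % c
      · rw [if_pos (by exact_mod_cast h)]
        simp [colChars, h.symm]
      · rw [if_neg (by exact_mod_cast h)]
        have h' : ¬ (m % c = k) := fun hh => h hh.symm
        simp [colChars, h']

/-- `rows = ceil(n / cols)` covers all of `s`: `s.length ≤ rows.toNat * c`. -/
lemma rows_covers (c : Nat) (hc : 0 < c) (s : List Char)
    (rows : Int) (hr : rows = -(PySem.Int.floordiv (-(s.length : Int)) (c : Int))) :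
    s.length ≤ rows.toNat * c := by
  have hcpos : (0 : Int) < (c : Int) := by exact_mod_cast hc
  have h := (PySem.Int.neg_floordiv_neg_eq_iff_of_pos (a := (s.length : Int)) (b := (c : Int))
      (q := rows) hcpos).mp hr.symm
  have hub : (s.length : Int) ≤ rows * c := h.2
  have hrnn : 0 ≤ rows := by
    by_contra hneg
    have h1 : rows * (c : Int) ≤ (-1) * (c : Int) :=
      mul_le_mul_of_nonneg_right (by omega) (le_of_lt hcpos)
    have h2 : (0 : Int) ≤ (s.length : Int) := by positivity
    omega
  have hfin : (s.length : Int) ≤ ((rows.toNat * c : Nat) : Int) := by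
    push_cast
    rw [Int.toNat_of_nonneg hrnn]
    exact hub
  exact_mod_cast hfin

/-- A's inner row loop, for column index `↑k`, rewritten to the `Nat` filter/map form. -/
lemma aside_inner (s : List Char) (c : Nat) (rows : Int) (k : Nat)
    (acc : List Char) :
    (PySem.List.pyRange 0 rows 1).foldl (fun acc row =>
        if row * (c : Int) + (k : Int) < (s.length : Int) then
          acc ++ [PySem.List.pyGetD s (row * (c : Int) + (k : Int)) ' '] else acc) acc
      = acc ++ ((List.range rows.toNat).filter (fun row => decide (row * c + k < s.length))).map
          (fun row => s.getD (row * c + k) ' ') := by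
  rw [PySem.List.pyRange_one, List.foldl_map]
  have hbody : (fun (acc : List Char) (x : Nat) =>
      if ((0 : Int) + (x : Int)) * (c : Int) + (k : Int) < (s.length : Int) then
        acc ++ [PySem.List.pyGetD s (((0 : Int) + (x : Int)) * (c : Int) + (k : Int)) ' '] else acc)
      = fun acc x => if (decide (x * c + k < s.length)) = true then
        acc ++ [s.getD (x * c + k) ' '] else acc := by
    funext acc x
    have hcast : ((0 : Int) + (x : Int)) * (c : Int) + (k : Int) = ((x * c + k : Nat) : Int) := by
      push_cast; ring
    rw [hcast, PySem.List.pyGetD_natCast]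
    by_cases h : x * c + k < s.length
    · rw [if_pos (by exact_mod_cast h), if_pos (by simpa using h)]
    · rw [if_neg (by exact_mod_cast h), if_neg (by simpa using h)]
  rw [hbody, PySem.List.foldl_append_if]
  congr 2
  simp

/-- Main equivalence for a positive column count. -/
lemma main_pos (text : String) (c : Nat) (hc : 0 < c) :
    columnar_transpose_read text ((c : Nat) : Int) = columnar_transpose_read_alt text ((c : Nat) : Int) := by
  simp only [columnar_transpose_read, columnar_transpose_read_alt, PySem.Str.len_eq]
  have hcover : text.toList.length ≤
      (-(PySem.Int.floordiv (-(text.toList.length : Int)) (c : Int))).toNat * c :=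
    rows_covers c hc text.toList _ rfl
  congr 1
  -- A's outer loop: each column contributes its `colChars`
  rw [PySem.List.foldl_congr_mem (PySem.List.pyRange 0 (c : Int) 1) _
      (fun acc col => acc ++ colChars c col.toNat text.toList 0) [] (by
    intro acc col hmem
    obtain ⟨h0, hlt⟩ := PySem.List.mem_pyRange_one.mp hmem
    have hcol : col = ((col.toNat : Nat) : Int) := (Int.toNat_of_nonneg h0).symm
    have hkc : col.toNat < c := by omega
    rw [hcol]
    refine (aside_inner text.toList c
        (-(PySem.Int.floordiv (-(text.toList.length : Int)) (c : Int))) col.toNat acc).trans ?_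
    rw [aside_column c col.toNat hkc
        (-(PySem.Int.floordiv (-(text.toList.length : Int)) (c : Int))).toNat text.toList hcover]
    have hmx : (max col 0).toNat = col.toNat := by omega
    simp only [Int.ofNat_toNat, hmx])]
  rw [PySem.List.foldl_append_eq_flatMap, List.nil_append, List.flatMap_def]
  -- B's buckets: bucket `col = ↑(col.toNat)` is `colChars`
  congr 1
  refine List.map_congr_left ?_
  intro col hmem
  obtain ⟨h0, hlt⟩ := PySem.List.mem_pyRange_one.mp hmem
  have hcol : col = ((col.toNat : Nat) : Int) := (Int.toNat_of_nonneg h0).symm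
  have hbuck := bside_bucket c col.toNat text.toList 0 PySem.Dict.empty
  simp only [Nat.cast_zero, PySem.Dict.getD_empty, List.nil_append] at hbuck
  rw [hcol, hbuck]
  have hmx : (max col 0).toNat = col.toNat := by omega
  simp only [Int.ofNat_toNat, hmx]

/-- Both sides return the empty string for a negative column count. -/
lemma main_neg (text : String) (cols : Int) (hneg : cols < 0) :
    columnar_transpose_read text cols = columnar_transpose_read_alt text cols := by
  simp only [columnar_transpose_read, columnar_transpose_read_alt]
  rw [PySem.List.pyRange_one_eq_nil (le_of_lt hneg)]
  simp

-- ===== VERDICT (by name: the statement is the Claim_ definition above) =====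
theorem columnar_transpose_read_spec : Claim_equal_columnar_transpose_read := by
  intro text cols _ hpre
  unfold Spec_columnar_transpose_read
  rcases lt_trichotomy cols 0 with h | h | h
  · exact main_neg text cols h
  · exact absurd h hpre
  · have hc : cols = ((cols.toNat : Nat) : Int) := (Int.toNat_of_nonneg (le_of_lt h)).symm
    rw [hc]
    exact main_pos text cols.toNat (by omega)
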